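-- pv_equiv track=rewrite | github.com/pkseeg/solved-kattis | geneticsearch.py | type_3
-- ===== SOURCE A (Python) =====
-- def type_1(s,l):
--     n = len(s)
--     count = 0
--     for i in range(len(l)):
--         if l[i:i+n] == s:
--             count += 1
--     return count
--
-- def type_3(s,l):
--     count = 0
--     seen = set()
--     for i in range(len(s)+1):
--         for c in ['A','G','C','T']:
--             new_s = s[:i] + c + s[i:]
--             if new_s not in seen:
--                 count += type_1(new_s,l)
--                 seen.add(new_s)
--     return count
-- ===== SOURCE B (Python) =====
-- def type_3(s, l):
--     m = len(s) + 1
--     variants = {s[:i] + c + s[i:] for i in range(len(s) + 1) for c in 'AGCT'}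
--     return sum(1 for i in range(len(l)) if l[i:i+m] in variants)
-- ===== Notes on version B (the rewrite author's own statement) =====
-- stated objective: faster
-- what changed: Instead of running a full substring-count scan of l for each distinct single-insertion variant, B builds the variant set once and makes one sliding-window pass over l testing set membership.
import Mathlib
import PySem

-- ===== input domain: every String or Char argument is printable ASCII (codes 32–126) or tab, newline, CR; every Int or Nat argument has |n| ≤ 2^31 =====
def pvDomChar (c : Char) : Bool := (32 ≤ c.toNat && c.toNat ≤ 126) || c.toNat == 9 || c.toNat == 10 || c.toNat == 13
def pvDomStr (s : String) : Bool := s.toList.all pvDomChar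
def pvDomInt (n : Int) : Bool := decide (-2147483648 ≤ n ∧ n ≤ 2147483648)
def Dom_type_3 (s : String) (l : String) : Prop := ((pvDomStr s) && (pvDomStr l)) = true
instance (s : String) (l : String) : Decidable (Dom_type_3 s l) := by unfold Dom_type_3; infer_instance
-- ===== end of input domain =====

-- B builds the set of single-insertion variants once and makes one sliding-window membership pass over l,
-- instead of A's full substring-count scan of l per distinct variant (objective: faster).

-- ===== PORT A =====
def type1core (ns l : List Char) : Int :=
  let n : Int := (ns.length : Int)
  (PySem.List.pyRange 0 (l.length : Int) 1).foldl
    (fun count i => if PySem.List.slice l (some i) (some (i + n)) = ns then count + 1 else count) 0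

def type3core (s l : List Char) : Int :=
  ((PySem.List.pyRange 0 ((s.length : Int) + 1) 1).foldl
    (fun (st : Int × PySem.Set (List Char)) i =>
      (['A','G','C','T'] : List Char).foldl
        (fun st c =>
          let new_s := PySem.List.slice s none (some i) ++ [c] ++ PySem.List.slice s (some i) none
          if PySem.Set.contains st.2 new_s then st
          else (st.1 + type1core new_s l, PySem.Set.add st.2 new_s)) st)
    ((0 : Int), ([] : PySem.Set (List Char)))).1

def type_3 (s : String) (l : String) : Int := type3core s.toList l.toList

-- ===== PORT B =====
def type3AltCore (s l : List Char) : Int :=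
  let m : Int := (s.length : Int) + 1
  let variants : PySem.Set (List Char) :=
    PySem.Set.ofList
      ((PySem.List.pyRange 0 ((s.length : Int) + 1) 1).flatMap
        (fun i => (['A','G','C','T'] : List Char).map
          (fun c => PySem.List.slice s none (some i) ++ [c] ++ PySem.List.slice s (some i) none)))
  (PySem.List.pyRange 0 (l.length : Int) 1).foldl
    (fun count i => if PySem.Set.contains variants (PySem.List.slice l (some i) (some (i + m))) then count + 1 else count) 0

def type_3_alt (s : String) (l : String) : Int := type3AltCore s.toList l.toList

-- ===== PRECONDITION & SPEC =====
def Spec_type_3 (s : String) (l : String) (out : Int) : Prop := out = type_3_alt s l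
instance (s : String) (l : String) (out : Int) : Decidable (Spec_type_3 s l out) := by unfold Spec_type_3; infer_instance

-- ===== CLAIM (what is proved, stated in full; the proofs are below) =====
def Claim_equal_type_3 : Prop := ∀ (s : String) (l : String), Dom_type_3 s l → Spec_type_3 s l (type_3 s l)

-- ===== LEMMAS AND PROOFS =====

-- the window of length m starting at position i
def pvWin (l : List Char) (m i : Int) : List Char :=
  PySem.List.slice l (some i) (some (i + m))
theorem type1core_eq_sum (v l : List Char) :
    type1core v l =
      ((PySem.List.pyRange 0 (l.length : Int) 1).map
        (fun i => if pvWin l (v.length : Int) i = v then (1 : Int) else 0)).sum := by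
  simp [type1core, pvWin, PySem.List.foldl_ite_add_one]
  rw [← PySem.List.sum_map_ite_one_zero]
  simp only [decide_eq_true_eq]
  rfl

theorem foldA_eq (l : List Char) (m : Int) (V : List (List Char))
    (hV : ∀ v ∈ V, (v.length : Int) = m) (S : PySem.Set (List Char)) (c : Int) :
    (V.foldl
      (fun (st : Int × PySem.Set (List Char)) v =>
        if PySem.Set.contains st.2 v then st
        else (st.1 + type1core v l, PySem.Set.add st.2 v)) (c, S)).1
    = c + ((PySem.List.pyRange 0 (l.length : Int) 1).map
        (fun i => if pvWin l m i ∈ V ∧ pvWin l m i ∉ S then (1 : Int) else 0)).sum := by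
  induction V generalizing S c with
  | nil => simp
  | cons v rest ih =>
    have hv : (v.length : Int) = m := hV v (by simp)
    have hrest : ∀ u ∈ rest, (u.length : Int) = m := fun u hu => hV u (by simp [hu])
    simp only [List.foldl_cons]
    by_cases hS : v ∈ S
    · rw [if_pos (by simp [PySem.Set.contains, hS])]
      rw [ih hrest S c]
      congr 1
      congr 1
      apply List.map_congr_left
      intro i _
      by_cases hw : pvWin l m i = v
      · simp [hw, hS]
      · simp [hw]
    · rw [if_neg (by simp [PySem.Set.contains, hS])]
      rw [ih hrest (PySem.Set.add S v) (c + type1core v l)]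
      rw [type1core_eq_sum, hv]
      have hpt : ∀ i ∈ PySem.List.pyRange 0 (l.length : Int) 1,
          (if pvWin l m i ∈ v :: rest ∧ pvWin l m i ∉ S then (1 : Int) else 0)
          = (if pvWin l m i = v then (1 : Int) else 0)
            + (if pvWin l m i ∈ rest ∧ pvWin l m i ∉ PySem.Set.add S v then (1 : Int) else 0) := by
        intro i _
        by_cases hw : pvWin l m i = v
        · simp [hw, hS]
        · simp [hw, PySem.Set.mem_add]
      rw [List.map_congr_left hpt, PySem.List.sum_map_add_int]
      ring

def pvVariants (s : List Char) : List (List Char) :=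
  (PySem.List.pyRange 0 ((s.length : Int) + 1) 1).flatMap
    (fun i => (['A','G','C','T'] : List Char).map
      (fun c => PySem.List.slice s none (some i) ++ [c] ++ PySem.List.slice s (some i) none))

theorem pvVariants_len (s : List Char) :
    ∀ v ∈ pvVariants s, (v.length : Int) = (s.length : Int) + 1 := by
  intro v hv
  simp only [pvVariants, List.mem_flatMap, List.mem_map] at hv
  obtain ⟨i, hi, c, -, rfl⟩ := hv
  rw [PySem.List.mem_pyRange_one] at hi
  rw [PySem.List.slice_to s hi.1, PySem.List.slice_from s hi.1]
  simp only [List.length_append, List.length_take, List.length_drop, List.length_cons, List.length_nil]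
  push_cast
  omega

theorem core_eq (s l : List Char) : type3core s l = type3AltCore s l := by
  have hA : type3core s l =
      ((pvVariants s).foldl
        (fun (st : Int × PySem.Set (List Char)) v =>
          if PySem.Set.contains st.2 v then st
          else (st.1 + type1core v l, PySem.Set.add st.2 v))
        ((0 : Int), ([] : PySem.Set (List Char)))).1 := by
    simp only [pvVariants, List.foldl_flatMap, List.foldl_map, type3core]
  rw [hA, foldA_eq l ((s.length : Int) + 1) (pvVariants s) (pvVariants_len s) [] 0]
  simp only [type3AltCore]
  rw [PySem.List.foldl_if_add_one]
  rw [← PySem.List.sum_map_ite_one_zero]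
  rw [zero_add, zero_add]
  apply congrArg
  apply List.map_congr_left
  intro i _
  simp only [pvVariants, pvWin, List.not_mem_nil, not_false_eq_true, and_true,
    PySem.Set.contains, List.contains_eq_mem, PySem.Set.mem_ofList, decide_eq_true_eq]

-- ===== VERDICT (by name: the statement is the Claim_ definition above) =====
theorem type_3_spec : Claim_equal_type_3 := by
  intro s l _
  unfold Spec_type_3
  simp only [type_3, type_3_alt]
  exact core_eq s.toList l.toList
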